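-- pv_equiv track=rewrite | github.com/signalwire-demos/afterhours | app.py | find_resource_address
-- ===== SOURCE A (Python) =====
-- def find_resource_address(addresses, agent_name):
--     """
--     Find the resource address matching /public/{agent_name} from a list of addresses.
--
--     When phone numbers are attached to a handler, multiple addresses exist.
--     We want the resource address (e.g., /public/afterhours) not the phone number address.
--     """
--     expected_address = f"/public/{agent_name}"
--
--     # First, try to find exact match for /public/{agent_name}
--     for addr in addresses:
--         audio_channel = addr.get("channels", {}).get("audio", "")
--         if audio_channel == expected_address:
--             return addr
--
--     # Fallback: find any address that looks like a SIP address (not a phone number)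
--     for addr in addresses:
--         audio_channel = addr.get("channels", {}).get("audio", "")
--         # SIP addresses start with /public/ and don't contain phone number patterns
--         if audio_channel.startswith("/public/") and not any(c.isdigit() for c in audio_channel.split("/")[-1][:3]):
--             return addr
--
--     # Last resort: return first address
--     return addresses[0] if addresses else None
-- ===== SOURCE B (Python) =====
-- def find_resource_address(addresses, agent_name):
--     """Rank every address (0 = exact /public/{agent_name} match, 1 = SIP-looking,
--     2 = anything else) and pick the minimum by (rank, position)."""
--     expected = f"/public/{agent_name}"
--
--     def rank(addr):
--         audio = addr.get("channels", {}).get("audio", "")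
--         if audio == expected:
--             return 0
--         if audio.startswith("/public/") and not any(c.isdigit() for c in audio.split("/")[-1][:3]):
--             return 1
--         return 2
--
--     if not addresses:
--         return None
--     return min(enumerate(addresses), key=lambda p: (rank(p[1]), p[0]))[1]
-- ===== Notes on version B (the rewrite author's own statement) =====
-- stated objective: alternative
-- what changed: A's two sequential scans plus a last-resort branch are replaced by a single ranking function (exact=0, SIP=1, other=2) and one min over (rank, position), which subsumes all three stages.
import Mathlib
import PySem

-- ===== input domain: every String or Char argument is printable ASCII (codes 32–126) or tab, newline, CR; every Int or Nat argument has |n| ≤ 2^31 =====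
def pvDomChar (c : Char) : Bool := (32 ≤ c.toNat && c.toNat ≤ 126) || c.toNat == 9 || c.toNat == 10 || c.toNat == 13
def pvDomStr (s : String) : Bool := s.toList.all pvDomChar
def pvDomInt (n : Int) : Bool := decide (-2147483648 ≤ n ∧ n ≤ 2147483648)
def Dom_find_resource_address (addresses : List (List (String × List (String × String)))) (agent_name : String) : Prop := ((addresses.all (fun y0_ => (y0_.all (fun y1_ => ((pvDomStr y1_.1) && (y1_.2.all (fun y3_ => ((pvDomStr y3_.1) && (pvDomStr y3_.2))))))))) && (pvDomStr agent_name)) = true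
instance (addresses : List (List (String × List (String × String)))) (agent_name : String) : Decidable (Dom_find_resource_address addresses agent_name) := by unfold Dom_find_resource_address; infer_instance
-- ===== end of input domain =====

-- B replaces A's staged scans by one ranking function (exact=0, SIP=1, other=2) and a
-- single min over (rank, position) (objective: alternative decomposition, same result).

-- ===== PORT A =====
-- dict.get(k, dflt) on an association list: first match wins (Python dicts have unique keys)
def fraGetD {β : Type} : List (String × β) → String → β → β
  | [], _, dflt => dflt
  | (k, v) :: rest, key, dflt => if k == key then v else fraGetD rest key dflt

-- addr.get("channels", {}).get("audio", "")
def fraAudio (addr : List (String × List (String × String))) : String :=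
  fraGetD (fraGetD addr "channels" []) "audio" ""

-- audio_channel.startswith("/public/") and not any(c.isdigit() for c in audio_channel.split("/")[-1][:3])
def fraIsSip (audio : String) : Bool :=
  PySem.Str.startswith audio "/public/" &&
  !((PySem.Str.slice (PySem.List.pyGetD ((PySem.Str.split? audio "/").getD []) (-1) "") none (some 3)).toList.any PySem.Chars.isdigit)

-- first loop of A: first exact match for expected_address
def fraLoop1 (expected : String) : List (List (String × List (String × String))) → Option (List (String × List (String × String)))
  | [] => none
  | addr :: rest =>
    if fraAudio addr = expected then some addr else fraLoop1 expected rest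

-- second loop of A: first SIP-looking address
def fraLoop2 : List (List (String × List (String × String))) → Option (List (String × List (String × String)))
  | [] => none
  | addr :: rest =>
    if fraIsSip (fraAudio addr) then some addr else fraLoop2 rest

def find_resource_address (addresses : List (List (String × List (String × String)))) (agent_name : String) : Option (List (String × List (String × String))) :=
  let expected := "/public/" ++ agent_name
  match fraLoop1 expected addresses with
  | some addr => some addr
  | none =>
    match fraLoop2 addresses with
    | some addr => some addr
    | none => match addresses with
              | [] => none
              | a :: _ => some a

-- ===== PORT B =====
-- audio lookup via first-match find? (exact Python-dict.get semantics on an association list)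
def frbAudio (addr : List (String × List (String × String))) : String :=
  let channels := (((addr.find? (fun kv => kv.1 == "channels")).map (·.2)).getD [])
  (((channels.find? (fun kv => kv.1 == "audio")).map (·.2)).getD "")

-- rank(addr): 0 if exact match, 1 if SIP-looking, else 2
def frbRank (expected : String) (addr : List (String × List (String × String))) : Nat :=
  let audio := frbAudio addr
  if audio = expected then 0
  else if PySem.Str.startswith audio "/public/" &&
          !((PySem.Str.slice (PySem.List.pyGetD ((PySem.Str.split? audio "/").getD []) (-1) "") none (some 3)).toList.any PySem.Chars.isdigit)
  then 1 else 2

-- min(enumerate(addresses), key = (rank, index)): fold keeping the first minimum; since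
-- positions strictly increase, a later pair wins only when its rank is strictly smaller
def frbMin (expected : String) : List (Int × List (String × List (String × String))) → (Nat × Int × List (String × List (String × String))) → List (String × List (String × String))
  | [], best => best.2.2
  | (i, a) :: rest, best =>
      let r := frbRank expected a
      frbMin expected rest (if r < best.1 then (r, i, a) else best)

def find_resource_address_alt (addresses : List (List (String × List (String × String)))) (agent_name : String) : Option (List (String × List (String × String))) :=
  let expected := "/public/" ++ agent_name
  match PySem.List.enumerate addresses with
  | [] => none
  | (i, a) :: rest => some (frbMin expected rest (frbRank expected a, i, a))

-- ===== PRECONDITION & SPEC =====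
def Spec_find_resource_address (addresses : List (List (String × List (String × String)))) (agent_name : String) (out : Option (List (String × List (String × String)))) : Prop := out = find_resource_address_alt addresses agent_name
instance (addresses : List (List (String × List (String × String)))) (agent_name : String) (out : Option (List (String × List (String × String)))) : Decidable (Spec_find_resource_address addresses agent_name out) := by unfold Spec_find_resource_address; infer_instance

-- ===== CLAIM (what is proved, stated in full; the proofs are below) =====
def Claim_equal_find_resource_address : Prop := ∀ (addresses : List (List (String × List (String × String)))) (agent_name : String), Dom_find_resource_address addresses agent_name → Spec_find_resource_address addresses agent_name (find_resource_address addresses agent_name)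

-- ===== LEMMAS AND PROOFS =====

-- B's rank agrees with A's two tests (find?-based lookup = fraGetD, first match wins)
theorem fraGetD_eq_find? {β : Type} (l : List (String × β)) (k : String) (d : β) :
    fraGetD l k d = (((l.find? (fun kv => kv.1 == k)).map (·.2)).getD d) := by
  induction l with
  | nil => rfl
  | cons p t ih =>
    obtain ⟨pk, pv⟩ := p
    by_cases h : (pk == k) = true <;> simp [fraGetD, List.find?, h, ih]

theorem frbAudio_eq (a : List (String × List (String × String))) :
    frbAudio a = fraAudio a := by
  unfold frbAudio fraAudio
  rw [← fraGetD_eq_find?, ← fraGetD_eq_find?]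

theorem frbRank_eq (expected : String) (a : List (String × List (String × String))) :
    frbRank expected a =
      if fraAudio a = expected then 0
      else if fraIsSip (fraAudio a) then 1 else 2 := by
  unfold frbRank fraIsSip
  rw [frbAudio_eq]

-- invariant of B's fold: with a carried best of rank br ≤ 2, the result is the first
-- exact match in the rest, else (for br ≤ 1) the carried element, else the first SIP
-- element in the rest, else the carried element
theorem frbMin_eq (expected : String)
    (l : List (Int × List (String × List (String × String))))
    (br : Nat) (bi : Int) (ba : List (String × List (String × String)))
    (hbr : br ≤ 2) :
    frbMin expected l (br, bi, ba) =
      if br = 0 then ba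
      else match fraLoop1 expected (l.map (·.2)) with
           | some x => x
           | none =>
             if br = 1 then ba
             else match fraLoop2 (l.map (·.2)) with
                  | some x => x
                  | none => ba := by
  induction l generalizing br bi ba with
  | nil => by_cases h : br = 0 <;> simp [frbMin, fraLoop1, fraLoop2, h]
  | cons p t ih =>
    obtain ⟨i, a⟩ := p
    have hr := frbRank_eq expected a
    by_cases hx : fraAudio a = expected
    · have h0 : frbRank expected a = 0 := by rw [hr, if_pos hx]
      by_cases hb : br = 0
      · have hstep : frbMin expected ((i, a) :: t) (br, bi, ba)
            = frbMin expected t (br, bi, ba) := by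
          simp [frbMin, h0, hb]
        rw [hstep, ih br bi ba hbr]
        simp [hb]
      · have hstep : frbMin expected ((i, a) :: t) (br, bi, ba)
            = frbMin expected t (0, i, a) := by
          simp [frbMin, h0, Nat.pos_of_ne_zero hb]
        rw [hstep, ih 0 i a (by omega)]
        simp [hb, fraLoop1, hx]
    · by_cases hs : fraIsSip (fraAudio a) = true
      · have h1 : frbRank expected a = 1 := by rw [hr, if_neg hx, if_pos hs]
        by_cases hb1 : br ≤ 1
        · have hstep : frbMin expected ((i, a) :: t) (br, bi, ba)
              = frbMin expected t (br, bi, ba) := by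
            have : ¬ frbRank expected a < br := by omega
            simp [frbMin, this]
          rw [hstep, ih br bi ba hbr]
          by_cases hb0 : br = 0
          · simp [hb0]
          · have hbe : br = 1 := by omega
            simp [hbe, fraLoop1, hx]
        · have hstep : frbMin expected ((i, a) :: t) (br, bi, ba)
              = frbMin expected t (1, i, a) := by
            have h1b : 1 < br := by omega
            simp [frbMin, h1, h1b]
          rw [hstep, ih 1 i a (by omega)]
          have hb0 : br ≠ 0 := by omega
          have hbn1 : br ≠ 1 := by omega
          simp [hb0, hbn1, fraLoop1, fraLoop2, hx, hs]
      · have h2 : frbRank expected a = 2 := by rw [hr, if_neg hx, if_neg hs]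
        have hstep : frbMin expected ((i, a) :: t) (br, bi, ba)
            = frbMin expected t (br, bi, ba) := by
          have : ¬ frbRank expected a < br := by omega
          simp [frbMin, this]
        rw [hstep, ih br bi ba hbr]
        simp [fraLoop1, fraLoop2, hx, hs]

-- ===== VERDICT (by name: the statement is the Claim_ definition above) =====
theorem find_resource_address_spec : Claim_equal_find_resource_address := by
  intro addresses agent_name _
  unfold Spec_find_resource_address find_resource_address find_resource_address_alt
  dsimp only
  cases addresses with
  | nil => rfl
  | cons a t =>
    rw [PySem.List.enumerate_cons]
    dsimp only
    have hmap : (PySem.List.enumerate t (0 + 1)).map (·.2) = t :=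
      PySem.List.map_snd_enumerate t _
    have hr := frbRank_eq ("/public/" ++ agent_name) a
    by_cases hx : fraAudio a = ("/public/" ++ agent_name)
    · have h0 : frbRank ("/public/" ++ agent_name) a = 0 := by rw [hr, if_pos hx]
      rw [h0, frbMin_eq _ _ 0 0 a (by omega), hmap]
      simp [fraLoop1, hx]
    · by_cases hs : fraIsSip (fraAudio a) = true
      · have h1 : frbRank ("/public/" ++ agent_name) a = 1 := by
          rw [hr, if_neg hx, if_pos hs]
        rw [h1, frbMin_eq _ _ 1 0 a (by omega), hmap]
        cases hL1 : fraLoop1 ("/public/" ++ agent_name) t <;>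
          simp [fraLoop1, fraLoop2, hx, hs, hL1]
      · have h2 : frbRank ("/public/" ++ agent_name) a = 2 := by
          rw [hr, if_neg hx, if_neg hs]
        rw [h2, frbMin_eq _ _ 2 0 a (by omega), hmap]
        cases hL1 : fraLoop1 ("/public/" ++ agent_name) t <;>
          cases hL2 : fraLoop2 t <;>
          simp [fraLoop1, fraLoop2, hx, hs, hL1, hL2]
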